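-- pv_equiv track=rewrite | github.com/OfentseDube/AI-Tools-and-Applications | improved_sentiment_model.py | old_sentiment_analysis
-- ===== SOURCE A (Python) =====
-- def old_sentiment_analysis(text):
--     OLD_POS = {'love', 'amazing', 'excellent', 'fantastic', 'brilliant', 'superb',
--                'happy', 'comfortable', 'worth', 'best', 'great', 'wonderful', 'good'}
--     OLD_NEG = {'terrible', 'disappointing', 'cheap', 'overpriced', 'disappointed',
--                'bugs', 'crashes', 'bad', 'worst', 'hate', 'awful', 'poor'}
--
--     text_lower = text.lower()
--     pos_count = sum(1 for word in OLD_POS if word in text_lower)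
--     neg_count = sum(1 for word in OLD_NEG if word in text_lower)
--
--     if pos_count > neg_count:
--         return "POSITIVE", pos_count - neg_count
--     elif neg_count > pos_count:
--         return "NEGATIVE", neg_count - pos_count
--     else:
--         return "NEUTRAL", 0
-- ===== SOURCE B (Python) =====
-- def old_sentiment_analysis(text):
--     POS = ['love', 'amazing', 'excellent', 'fantastic', 'brilliant', 'superb',
--            'happy', 'comfortable', 'worth', 'best', 'great', 'wonderful', 'good']
--     NEG = ['terrible', 'disappointing', 'cheap', 'overpriced', 'disappointed',
--            'bugs', 'crashes', 'bad', 'worst', 'hate', 'awful', 'poor']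
--     words = POS + NEG
--     t = text.lower()
--     found = set()
--     for i in range(len(t)):
--         for w in words:
--             if w not in found and t.startswith(w, i):
--                 found.add(w)
--     score = 0
--     for w in found:
--         score += 1 if w in POS else -1
--     if score > 0:
--         return "POSITIVE", score
--     if score < 0:
--         return "NEGATIVE", -score
--     return "NEUTRAL", 0
-- ===== Notes on version B (the rewrite author's own statement) =====
-- stated objective: alternative
-- what changed: B inverts the traversal: instead of one substring-containment test per keyword plus two count comparisons, it scans the lowercased text position by position, collecting into a found-set every keyword that starts at the current position, then sums +1/-1 weights over that set and branches on the sign.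
import Mathlib
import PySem

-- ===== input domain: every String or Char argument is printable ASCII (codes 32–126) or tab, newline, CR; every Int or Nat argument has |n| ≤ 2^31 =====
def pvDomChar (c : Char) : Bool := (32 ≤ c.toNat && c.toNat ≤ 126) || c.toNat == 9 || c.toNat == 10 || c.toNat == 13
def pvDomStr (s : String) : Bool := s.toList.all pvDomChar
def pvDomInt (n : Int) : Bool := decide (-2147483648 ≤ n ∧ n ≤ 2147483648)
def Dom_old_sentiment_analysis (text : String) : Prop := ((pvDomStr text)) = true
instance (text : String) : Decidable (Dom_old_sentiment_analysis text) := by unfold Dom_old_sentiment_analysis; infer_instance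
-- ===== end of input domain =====

-- B inverts the traversal: it scans the lowercased text position by position, collecting every
-- keyword that starts at the current position into a found-set, then sums +1/-1 weights over that
-- set and branches on the sign (objective: alternative; same asymptotic cost).

-- ===== PORT A =====
def pvOldPos : List String :=
  ["love", "amazing", "excellent", "fantastic", "brilliant", "superb",
   "happy", "comfortable", "worth", "best", "great", "wonderful", "good"]

def pvOldNeg : List String :=
  ["terrible", "disappointing", "cheap", "overpriced", "disappointed",
   "bugs", "crashes", "bad", "worst", "hate", "awful", "poor"]

def old_sentiment_analysis (text : String) : String × Int :=
  let text_lower := PySem.Str.lower text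
  let pos_count : Int := pvOldPos.foldl (fun a w => a + if PySem.Str.isIn w text_lower then 1 else 0) 0
  let neg_count : Int := pvOldNeg.foldl (fun a w => a + if PySem.Str.isIn w text_lower then 1 else 0) 0
  if pos_count > neg_count then ("POSITIVE", pos_count - neg_count)
  else if neg_count > pos_count then ("NEGATIVE", neg_count - pos_count)
  else ("NEUTRAL", 0)

-- ===== PORT B =====
def pvPosB : List String :=
  ["love", "amazing", "excellent", "fantastic", "brilliant", "superb",
   "happy", "comfortable", "worth", "best", "great", "wonderful", "good"]

def pvNegB : List String :=
  ["terrible", "disappointing", "cheap", "overpriced", "disappointed",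
   "bugs", "crashes", "bad", "worst", "hate", "awful", "poor"]

-- inner loop 'for w in words: if w not in found and t.startswith(w, j): found.add(w)';
-- t.startswith(w, j) with 0 ≤ j is exactly 'w is a prefix of t[j:]' (Chars.startswith on tl.drop j)
def pvScanStep (tl : List Char) (j : Nat) (ws : List String) (fd : PySem.Set String) : PySem.Set String :=
  ws.foldl
    (fun fd w =>
      if !PySem.Set.contains fd w && PySem.Chars.startswith (tl.drop j) w.toList then
        PySem.Set.add fd w
      else fd)
    fd

def old_sentiment_analysis_alt (text : String) : String × Int :=
  let words := pvPosB ++ pvNegB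
  let t := PySem.Str.lower text
  let tl := t.toList
  let found : PySem.Set String :=
    (PySem.List.pyRange 0 (PySem.Str.len t) 1).foldl
      (fun fd i => pvScanStep tl i.toNat words fd)   -- i ∈ range(len(t)) is nonnegative, so .toNat is exact
      PySem.Set.empty
  let score : Int := found.foldl (fun a w => a + if pvPosB.contains w then 1 else -1) 0
  if score > 0 then ("POSITIVE", score)
  else if score < 0 then ("NEGATIVE", -score)
  else ("NEUTRAL", 0)

-- ===== PRECONDITION & SPEC =====
def Spec_old_sentiment_analysis (text : String) (out : String × Int) : Prop := out = old_sentiment_analysis_alt text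
instance (text : String) (out : String × Int) : Decidable (Spec_old_sentiment_analysis text out) := by unfold Spec_old_sentiment_analysis; infer_instance

-- ===== CLAIM (what is proved, stated in full; the proofs are below) =====
def Claim_equal_old_sentiment_analysis : Prop := ∀ (text : String), Dom_old_sentiment_analysis text → Spec_old_sentiment_analysis text (old_sentiment_analysis text)

-- ===== LEMMAS AND PROOFS =====

theorem pv_count_fold (t : String) (ws : List String) (a : Int) :
    ws.foldl (fun a w => a + if PySem.Str.isIn w t then 1 else 0) a
      = a + (ws.countP (fun w => PySem.Str.isIn w t) : Int) := by
  induction ws generalizing a with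
  | nil => simp
  | cons w ws ih =>
    by_cases h : PySem.Str.isIn w t = true
    · simp only [List.foldl, ih, List.countP_cons, h, if_true]; push_cast; ring
    · simp only [List.foldl, ih, List.countP_cons, h]; push_cast; ring

theorem pv_mem_scanStep_one (tl : List Char) (j : Nat) (v : String) (fd : PySem.Set String) (w : String) :
    (w ∈ if !PySem.Set.contains fd v && PySem.Chars.startswith (tl.drop j) v.toList then
        PySem.Set.add fd v else fd)
      ↔ w ∈ fd ∨ (w = v ∧ v.toList <+: tl.drop j) := by
  cases hc : PySem.Set.contains fd v <;> cases hs : PySem.Chars.startswith (tl.drop j) v.toList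
  · simp only [Bool.not_false, Bool.and_false, Bool.false_eq_true, if_false]
    have : ¬ v.toList <+: tl.drop j := fun h => by
      simp [(PySem.Chars.startswith_iff _ _).2 h] at hs
    tauto
  · simp only [Bool.not_false, Bool.and_true, if_true, PySem.Set.mem_add]
    have : v.toList <+: tl.drop j := (PySem.Chars.startswith_iff _ _).1 hs
    tauto
  · simp only [Bool.not_true, Bool.false_and, Bool.false_eq_true, if_false]
    have : ¬ v.toList <+: tl.drop j := fun h => by
      simp [(PySem.Chars.startswith_iff _ _).2 h] at hs
    tauto
  · simp only [Bool.not_true, Bool.false_and, Bool.false_eq_true, if_false]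
    have hv : v ∈ fd := (PySem.Set.contains_iff _ _).1 hc
    constructor
    · exact Or.inl
    · rintro (h | ⟨rfl, _⟩)
      · exact h
      · exact hv

theorem pv_mem_scanStep (tl : List Char) (j : Nat) (ws : List String) (fd : PySem.Set String) (w : String) :
    w ∈ pvScanStep tl j ws fd ↔ w ∈ fd ∨ (w ∈ ws ∧ w.toList <+: tl.drop j) := by
  induction ws generalizing fd with
  | nil => simp [pvScanStep]
  | cons v ws ih =>
    simp only [pvScanStep, List.foldl] at *
    rw [ih]
    rw [show (w ∈ if !PySem.Set.contains fd v && PySem.Chars.startswith (tl.drop j) v.toList then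
        PySem.Set.add fd v else fd) ↔ _ from pv_mem_scanStep_one tl j v fd w]
    simp only [List.mem_cons]
    constructor
    · rintro (⟨h | ⟨rfl, hp⟩⟩ | ⟨hm, hp⟩)
      · exact Or.inl h
      · exact Or.inr ⟨Or.inl rfl, hp⟩
      · exact Or.inr ⟨Or.inr hm, hp⟩
    · rintro (h | ⟨rfl | hm, hp⟩)
      · exact Or.inl (Or.inl h)
      · exact Or.inl (Or.inr ⟨rfl, hp⟩)
      · exact Or.inr ⟨hm, hp⟩

theorem pv_nodup_scanStep (tl : List Char) (j : Nat) (ws : List String) (fd : PySem.Set String)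
    (h : fd.Nodup) : (pvScanStep tl j ws fd).Nodup := by
  induction ws generalizing fd with
  | nil => simpa [pvScanStep] using h
  | cons v ws ih =>
    simp only [pvScanStep, List.foldl] at *
    split
    · exact ih _ (PySem.Set.nodup_add fd v h)
    · exact ih _ h

theorem pv_mem_outer (tl : List Char) (ws : List String) (n : Nat) (fd : PySem.Set String) (w : String) :
    w ∈ (List.range n).foldl (fun fd j => pvScanStep tl j ws fd) fd
      ↔ w ∈ fd ∨ (w ∈ ws ∧ ∃ j < n, w.toList <+: tl.drop j) := by
  induction n generalizing fd with
  | zero => simp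
  | succ n ih =>
    rw [List.range_succ, List.foldl_append]
    simp only [List.foldl, pv_mem_scanStep, ih]
    constructor
    · rintro ((h | ⟨hm, j, hj, hp⟩) | ⟨hm, hp⟩)
      · exact Or.inl h
      · exact Or.inr ⟨hm, j, Nat.lt_succ_of_lt hj, hp⟩
      · exact Or.inr ⟨hm, n, Nat.lt_succ_self n, hp⟩
    · rintro (h | ⟨hm, j, hj, hp⟩)
      · exact Or.inl (Or.inl h)
      · rcases Nat.lt_succ_iff_lt_or_eq.1 hj with hj | rfl
        · exact Or.inl (Or.inr ⟨hm, j, hj, hp⟩)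
        · exact Or.inr ⟨hm, hp⟩

theorem pv_nodup_outer (tl : List Char) (ws : List String) (n : Nat) (fd : PySem.Set String)
    (h : fd.Nodup) : ((List.range n).foldl (fun fd j => pvScanStep tl j ws fd) fd).Nodup := by
  induction n generalizing fd with
  | zero => simpa using h
  | succ n ih =>
    rw [List.range_succ, List.foldl_append]
    exact pv_nodup_scanStep _ _ _ _ (ih _ h)

-- for a nonempty pattern, 'matches at some position < length' is exactly substring containment
theorem pv_exists_lt_iff_isIn (tl : List Char) (w : String) (hw : w.toList ≠ []) :
    (∃ j < tl.length, w.toList <+: tl.drop j) ↔ PySem.Chars.isIn w.toList tl = true := by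
  rw [← PySem.Chars.exists_prefix_drop_iff_isIn]
  constructor
  · rintro ⟨j, _, hp⟩; exact ⟨j, hp⟩
  · rintro ⟨j, hp⟩
    by_cases hj : j < tl.length
    · exact ⟨j, hj, hp⟩
    · rw [List.drop_eq_nil_of_le (le_of_not_gt hj)] at hp
      exact absurd (List.prefix_nil.1 hp) hw

theorem pv_words_ne_nil : ∀ w ∈ pvPosB ++ pvNegB, w.toList ≠ [] := by decide

theorem pv_disjointPN : ∀ w ∈ pvNegB, w ∉ pvPosB := by decide

theorem pv_foldl_add_map (l : List String) (f : String → Int) (a : Int) :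
    l.foldl (fun a w => a + f w) a = a + (l.map f).sum := by
  induction l generalizing a with
  | nil => simp
  | cons w l ih => simp [List.foldl, ih]; ring

theorem pv_sum_map_const_of (l : List String) (f : String → Int) (c : Int)
    (h : ∀ w ∈ l, f w = c) : (l.map f).sum = l.length * c := by
  induction l with
  | nil => simp
  | cons w l ih =>
    simp only [List.map, List.sum_cons, h w (List.mem_cons_self ..),
      ih (fun v hv => h v (List.mem_cons_of_mem _ hv))]
    simp [List.length_cons]; ring

-- ===== VERDICT (by name: the statement is the Claim_ definition above) =====
theorem old_sentiment_analysis_spec : Claim_equal_old_sentiment_analysis := by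
  intro text _
  unfold Spec_old_sentiment_analysis old_sentiment_analysis old_sentiment_analysis_alt
  dsimp only
  set t := PySem.Str.lower text with ht
  set tl := t.toList with htl
  set words := pvPosB ++ pvNegB with hwords
  -- rewrite B's outer fold over pyRange into a fold over List.range
  have hrange : (PySem.List.pyRange 0 (PySem.Str.len t) 1).foldl
      (fun fd i => pvScanStep tl i.toNat words fd) PySem.Set.empty
      = (List.range tl.length).foldl (fun fd j => pvScanStep tl j words fd) PySem.Set.empty := by
    rw [PySem.List.pyRange_one]
    rw [List.foldl_map]
    simp [PySem.Str.len_eq, htl, String.length_toList]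
  set P : String → Bool := fun w => PySem.Str.isIn w t with hP
  set found := (List.range tl.length).foldl (fun fd j => pvScanStep tl j words fd)
      (PySem.Set.empty : PySem.Set String) with hfound
  have hmemfound : ∀ w, w ∈ found ↔ w ∈ words.filter P := by
    intro w
    rw [hfound, pv_mem_outer, List.mem_filter]
    constructor
    · rintro (h | ⟨hm, hex⟩)
      · simp [PySem.Set.empty] at h
      · refine ⟨hm, ?_⟩
        have hw : w.toList ≠ [] := pv_words_ne_nil w (hwords ▸ hm)
        have := (pv_exists_lt_iff_isIn tl w hw).1 hex
        rw [hP]; simpa [PySem.Str.isIn_eq, htl] using this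
    · rintro ⟨hm, hp⟩
      refine Or.inr ⟨hm, ?_⟩
      have hw : w.toList ≠ [] := pv_words_ne_nil w (hwords ▸ hm)
      refine (pv_exists_lt_iff_isIn tl w hw).2 ?_
      rw [hP] at hp; simpa [PySem.Str.isIn_eq, htl] using hp
  have hnd : found.Nodup := pv_nodup_outer _ _ _ _ (by simp [PySem.Set.empty])
  have hperm : found.Perm (words.filter P) := by
    rw [List.perm_ext_iff_of_nodup hnd (List.Nodup.filter _ (by rw [hwords]; decide))]
    exact hmemfound
  -- the score is (pos matches) - (neg matches)
  have hscore : found.foldl (fun a w => a + if pvPosB.contains w then 1 else -1) 0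
      = (pvPosB.countP P : Int) - (pvNegB.countP P : Int) := by
    rw [pv_foldl_add_map]
    have hsum := (hperm.map (fun w => if pvPosB.contains w then (1 : Int) else -1)).sum_eq
    rw [hsum, hwords, List.filter_append, List.map_append, List.sum_append]
    rw [pv_sum_map_const_of (pvPosB.filter P) _ 1
        (by intro w hw
            have hm := List.mem_of_mem_filter hw
            simp [hm]),
      pv_sum_map_const_of (pvNegB.filter P) _ (-1)
        (by intro w hw
            have hm := List.mem_of_mem_filter hw
            simp [pv_disjointPN w hm])]
    rw [← List.countP_eq_length_filter, ← List.countP_eq_length_filter]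
    ring
  rw [hrange, hscore]
  simp only [pv_count_fold, zero_add]
  set p : Int := (pvOldPos.countP (fun w => PySem.Str.isIn w t) : Int) with hp
  set n : Int := (pvOldNeg.countP (fun w => PySem.Str.isIn w t) : Int) with hn
  have hpp : (pvPosB.countP P : Int) = p := by rw [hp, hP]; rfl
  have hnn : (pvNegB.countP P : Int) = n := by rw [hn, hP]; rfl
  rw [hpp, hnn]
  split_ifs with h1 h2 h3 h4 h5 <;> first | rfl | (exfalso; omega) | (refine Prod.ext rfl ?_; omega)
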